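-- pv_equiv track=rewrite | github.com/cristianoc/arc-code-golf-solutions | task156.py | _inner_rect
-- ===== SOURCE A (Python) =====
-- def _inner_rect(comp):
--     is_ = [i for i,_ in comp]
--     js_ = [j for _,j in comp]
--     top = min(is_)+1
--     bot = max(is_)-1
--     left = min(js_)+1
--     right = max(js_)-1
--     return top, left, bot, right
-- ===== SOURCE B (Python) =====
-- def _inner_rect(comp):
--     si = sorted(i for i, _ in comp)
--     sj = sorted(j for _, j in comp)
--     return si[0] + 1, sj[0] + 1, si[-1] - 1, sj[-1] - 1
-- ===== Notes on version B (the rewrite author's own statement) =====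
-- stated objective: alternative
-- what changed: Replaces the four min/max scans with sorting each coordinate list once and reading the bounds off the endpoints of the sorted lists.
import Mathlib
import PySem

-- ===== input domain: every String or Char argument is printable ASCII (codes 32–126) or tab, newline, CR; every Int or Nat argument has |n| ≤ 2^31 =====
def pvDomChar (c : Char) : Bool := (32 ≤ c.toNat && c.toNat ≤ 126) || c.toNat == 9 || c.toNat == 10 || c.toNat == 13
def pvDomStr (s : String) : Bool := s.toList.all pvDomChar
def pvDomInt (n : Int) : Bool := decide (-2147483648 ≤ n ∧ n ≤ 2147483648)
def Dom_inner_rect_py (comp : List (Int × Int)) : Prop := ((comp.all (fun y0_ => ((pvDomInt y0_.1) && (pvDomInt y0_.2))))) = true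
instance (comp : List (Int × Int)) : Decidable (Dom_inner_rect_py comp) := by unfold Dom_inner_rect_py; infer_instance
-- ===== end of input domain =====

-- B sorts each coordinate list once and reads the bounds off the sorted endpoints, instead of A's four min/max scans (objective: alternative).

-- ===== PORT A =====
def inner_rect_py (comp : List (Int × Int)) : Int × Int × Int × Int :=
  let is_ := comp.map (fun p => p.1)
  let js_ := comp.map (fun p => p.2)
  let top := (PySem.List.min? is_ (fun x => x)).getD 0 + 1   -- min([]) raises ValueError: excluded by Pre_
  let bot := (PySem.List.max? is_ (fun x => x)).getD 0 - 1
  let left := (PySem.List.min? js_ (fun x => x)).getD 0 + 1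
  let right := (PySem.List.max? js_ (fun x => x)).getD 0 - 1
  (top, left, bot, right)

-- ===== PORT B =====
def inner_rect_py_alt (comp : List (Int × Int)) : Int × Int × Int × Int :=
  let si := PySem.List.sorted (comp.map (fun p => p.1)) (fun x => x) false
  let sj := PySem.List.sorted (comp.map (fun p => p.2)) (fun x => x) false
  -- si[0] / si[-1] raise IndexError on []: excluded by Pre_
  (PySem.List.pyGetD si 0 0 + 1, PySem.List.pyGetD sj 0 0 + 1,
   PySem.List.pyGetD si (-1) 0 - 1, PySem.List.pyGetD sj (-1) 0 - 1)

-- ===== PRECONDITION & SPEC =====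
-- Pre_ excludes only the empty list, on which A raises ValueError (min of an empty sequence).
def Pre_inner_rect_py (comp : List (Int × Int)) : Prop := comp ≠ []
instance (comp : List (Int × Int)) : Decidable (Pre_inner_rect_py comp) := by unfold Pre_inner_rect_py; infer_instance
def pvWitness_inner_rect_py : (List (Int × Int)) := [(2, 3), (5, 1)]

def Spec_inner_rect_py (comp : List (Int × Int)) (out : Int × Int × Int × Int) : Prop := out = inner_rect_py_alt comp
instance (comp : List (Int × Int)) (out : Int × Int × Int × Int) : Decidable (Spec_inner_rect_py comp out) := by unfold Spec_inner_rect_py; infer_instance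

-- ===== CLAIM =====
def Claim_equal_inner_rect_py : Prop := ∀ (comp : List (Int × Int)), Dom_inner_rect_py comp → Pre_inner_rect_py comp → Spec_inner_rect_py comp (inner_rect_py comp)

-- ===== LEMMAS AND PROOFS =====

-- In a ≤-sorted nonempty list every element is ≤ the last one.
theorem getLast_ge_of_pairwise (l : List Int) (h : l.Pairwise (· ≤ ·)) (hne : l ≠ []) :
    ∀ y ∈ l, y ≤ l.getLast hne := by
  induction l with
  | nil => exact absurd rfl hne
  | cons a t ih =>
    intro y hy
    cases t with
    | nil => simp at hy; simp [hy]
    | cons b u =>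
      have h' := (List.pairwise_cons.mp h)
      rw [List.getLast_cons (by simp)]
      rcases List.mem_cons.mp hy with rfl | hyt
      · exact le_trans (h'.1 _ (List.getLast_mem _)) (le_refl _)
      · exact ih h'.2 (by simp) y hyt

-- Endpoints of sorted(x::t): head is the running min, last is the running max.
theorem sorted_endpoints (x : Int) (t : List Int) :
    PySem.List.pyGetD (PySem.List.sorted (x :: t) (fun y => y) false) 0 0 = t.foldl min x ∧
    PySem.List.pyGetD (PySem.List.sorted (x :: t) (fun y => y) false) (-1) 0 = t.foldl max x := by
  set s := PySem.List.sorted (x :: t) (fun y => y) false with hs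
  have hne : s ≠ [] := by
    rw [hs]; simp [PySem.List.sorted_eq_nil_iff]
  have hperm : s.Perm (x :: t) := PySem.List.sorted_perm _ _ _
  have hmem : ∀ y, y ∈ s ↔ y ∈ x :: t := fun y => hperm.mem_iff
  have hpw : s.Pairwise (· ≤ ·) := by
    have := PySem.List.sorted_pairwise (xs := x :: t) (key := fun y => y)
    simpa [hs] using this
  -- min side
  have hminq : PySem.List.min? (x :: t) (fun y => y) = some (t.foldl min x) :=
    PySem.List.min?_id_cons x t
  have hminmem : t.foldl min x ∈ x :: t := PySem.List.min?_mem hminq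
  have hminle : ∀ y ∈ x :: t, t.foldl min x ≤ y := PySem.List.min?_isMin hminq
  have hmaxq : PySem.List.max? (x :: t) (fun y => y) = some (t.foldl max x) :=
    PySem.List.max?_id_cons x t
  have hmaxmem : t.foldl max x ∈ x :: t := PySem.List.max?_mem hmaxq
  have hmaxge : ∀ y ∈ x :: t, y ≤ t.foldl max x := PySem.List.max?_isMax hmaxq
  obtain ⟨h0, rest, hcons⟩ := List.exists_cons_of_ne_nil hne
  constructor
  · rw [hcons, PySem.List.pyGetD_zero_cons]
    have hhle : ∀ y ∈ x :: t, h0 ≤ y := by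
      have := PySem.List.key_head_sorted_le (xs := x :: t) (key := fun y => y) (hs.symm.trans hcons)
      simpa using this
    have hhm : h0 ∈ x :: t := (hmem h0).mp (by rw [hcons]; exact List.mem_cons_self)
    exact le_antisymm (hhle _ hminmem) (hminle _ hhm)
  · rw [PySem.List.pyGetD_neg_one (xs := s) (h := hne)]
    have hlmem : s.getLast hne ∈ x :: t := (hmem _).mp (List.getLast_mem _)
    have hlge : ∀ y ∈ x :: t, y ≤ s.getLast hne := by
      intro y hy
      exact getLast_ge_of_pairwise s hpw hne y ((hmem y).mpr hy)
    exact le_antisymm (hmaxge _ hlmem) (hlge _ hmaxmem)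

-- ===== VERDICT =====
theorem inner_rect_py_spec : Claim_equal_inner_rect_py := by
  intro comp _ hpre
  unfold Spec_inner_rect_py inner_rect_py inner_rect_py_alt
  match comp with
  | [] => exact absurd rfl hpre
  | (i0, j0) :: rest =>
    simp only [List.map_cons, PySem.List.min?_id_cons, PySem.List.max?_id_cons, Option.getD_some]
    have hi := sorted_endpoints i0 (rest.map (fun p => p.1))
    have hj := sorted_endpoints j0 (rest.map (fun p => p.2))
    rw [hi.1, hi.2, hj.1, hj.2]
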